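-- pv_equiv track=rewrite | github.com/mjurk456/100days | 12 Even digits.py | dividing
-- ===== SOURCE A (Python) =====
-- def dividing(lowerLimit, upperLimit, symbol):
--     temp = []
--     for i in range(lowerLimit, upperLimit + 1):
--         if ((i // 1000) % 2 == 0) \
--            and ((i % 1000 // 100) % 2 == 0) \
--            and ((i % 1000 % 100 // 10) % 2 == 0) \
--            and ((i % 1000 % 100 % 10) % 2 == 0):
--             temp.append(str(i))
--     return symbol.join(temp)
-- ===== SOURCE B (Python) =====
-- def dividing(lowerLimit, upperLimit, symbol):
--     evens = (0, 2, 4, 6, 8)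
--     combos = [100 * a + 10 * b + c for a in evens for b in evens for c in evens]
--     out = []
--     for h in range(lowerLimit // 1000, upperLimit // 1000 + 1):
--         if h % 2 == 0:
--             base = 1000 * h
--             for r in combos:
--                 n = base + r
--                 if lowerLimit <= n <= upperLimit:
--                     out.append(str(n))
--     return symbol.join(out)
-- ===== Notes on version B (the rewrite author's own statement) =====
-- stated objective: alternative
-- what changed: Instead of testing every integer in [lowerLimit, upperLimit] digit by digit, B enumerates candidates directly: for each even thousands-part h it adds 1000*h to each of the 125 precomputed all-even three-digit residues and keeps those within bounds.
import Mathlib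
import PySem

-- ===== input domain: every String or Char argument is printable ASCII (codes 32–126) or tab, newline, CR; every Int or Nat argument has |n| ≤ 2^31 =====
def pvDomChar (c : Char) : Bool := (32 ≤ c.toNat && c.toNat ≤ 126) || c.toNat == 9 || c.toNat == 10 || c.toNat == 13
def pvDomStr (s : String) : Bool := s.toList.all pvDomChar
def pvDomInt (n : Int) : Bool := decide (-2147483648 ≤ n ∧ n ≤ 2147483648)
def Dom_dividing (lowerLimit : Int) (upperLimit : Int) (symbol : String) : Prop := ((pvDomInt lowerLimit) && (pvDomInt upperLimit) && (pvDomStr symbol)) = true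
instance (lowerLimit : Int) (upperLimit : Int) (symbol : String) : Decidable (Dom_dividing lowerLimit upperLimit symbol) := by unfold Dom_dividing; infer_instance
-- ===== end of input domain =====

-- B replaces A's per-number digit test over the whole range by direct enumeration of
-- candidates: even thousands-part × the 125 all-even 3-digit residues, clipped to bounds.


-- ===== PORT A =====
-- the if-condition of A's loop body (digit-parity test, Python floor-division semantics)
def pvCondA (i : Int) : Bool :=
  (PySem.Int.mod (PySem.Int.floordiv i 1000) 2 == 0) &&
  (PySem.Int.mod (PySem.Int.floordiv (PySem.Int.mod i 1000) 100) 2 == 0) &&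
  (PySem.Int.mod (PySem.Int.floordiv (PySem.Int.mod (PySem.Int.mod i 1000) 100) 10) 2 == 0) &&
  (PySem.Int.mod (PySem.Int.mod (PySem.Int.mod (PySem.Int.mod i 1000) 100) 10) 2 == 0)

def dividing (lowerLimit : Int) (upperLimit : Int) (symbol : String) : String :=
  let temp := (PySem.List.pyRange lowerLimit (upperLimit + 1) 1).foldl
    (fun acc i => if pvCondA i then acc ++ [PySem.Int.toStr i] else acc) []
  PySem.Str.join symbol temp

-- ===== PORT B =====
def pvEvens : List Int := [0, 2, 4, 6, 8]

def pvCombos : List Int :=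
  pvEvens.flatMap (fun a => pvEvens.flatMap (fun b => pvEvens.map (fun c => 100*a + 10*b + c)))

def dividing_alt (lowerLimit : Int) (upperLimit : Int) (symbol : String) : String :=
  let out := (PySem.List.pyRange (PySem.Int.floordiv lowerLimit 1000)
                (PySem.Int.floordiv upperLimit 1000 + 1) 1).foldl
    (fun acc h =>
      if PySem.Int.mod h 2 == 0 then
        pvCombos.foldl (fun acc2 r =>
          let n := 1000 * h + r
          if decide (lowerLimit ≤ n) && decide (n ≤ upperLimit) then acc2 ++ [PySem.Int.toStr n] else acc2) acc
      else acc) []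
  PySem.Str.join symbol out

-- ===== PRECONDITION & SPEC =====
def Spec_dividing (lowerLimit : Int) (upperLimit : Int) (symbol : String) (out : String) : Prop := out = dividing_alt lowerLimit upperLimit symbol
instance (lowerLimit : Int) (upperLimit : Int) (symbol : String) (out : String) : Decidable (Spec_dividing lowerLimit upperLimit symbol out) := by unfold Spec_dividing; infer_instance

-- ===== CLAIM (what is proved, stated in full; the proofs are below) =====
def Claim_equal_dividing : Prop := ∀ (lowerLimit : Int) (upperLimit : Int) (symbol : String), Dom_dividing lowerLimit upperLimit symbol → Spec_dividing lowerLimit upperLimit symbol (dividing lowerLimit upperLimit symbol)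

-- ===== LEMMAS AND PROOFS =====

-- the last three conjuncts of pvCondA depend only on i % 1000
def pvCond0 (r : Int) : Bool :=
  (PySem.Int.mod (PySem.Int.floordiv r 100) 2 == 0) &&
  (PySem.Int.mod (PySem.Int.floordiv (PySem.Int.mod r 100) 10) 2 == 0) &&
  (PySem.Int.mod (PySem.Int.mod (PySem.Int.mod r 100) 10) 2 == 0)

lemma pvFloordiv_shift (h r : Int) (h0 : 0 ≤ r) (h1 : r < 1000) :
    PySem.Int.floordiv (1000 * h + r) 1000 = h := by
  rw [PySem.Int.floordiv_eq_iff_of_pos (by omega)]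
  constructor <;> omega

lemma pvMod_shift (h r : Int) (h0 : 0 ≤ r) (h1 : r < 1000) :
    PySem.Int.mod (1000 * h + r) 1000 = r := by
  have := PySem.Int.floordiv_mul_add_mod (1000 * h + r) 1000
  rw [pvFloordiv_shift h r h0 h1] at this
  omega

lemma pvCondA_shift (h r : Int) (h0 : 0 ≤ r) (h1 : r < 1000) :
    pvCondA (1000 * h + r) = ((PySem.Int.mod h 2 == 0) && pvCond0 r) := by
  simp only [pvCondA, pvCond0, pvFloordiv_shift h r h0 h1, pvMod_shift h r h0 h1,
    Bool.and_assoc]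

set_option maxRecDepth 100000 in
lemma pvFilter0 : (PySem.List.pyRange 0 1000 1).filter pvCond0 = pvCombos := by decide

lemma pvBlock (h : Int) :
    (PySem.List.pyRange (1000 * h) (1000 * h + 1000) 1).filter pvCondA
    = if PySem.Int.mod h 2 == 0 then pvCombos.map (fun r => 1000 * h + r) else [] := by
  have hshift : PySem.List.pyRange (1000 * h) (1000 * h + 1000) 1
      = (PySem.List.pyRange 0 1000 1).map (fun r => 1000 * h + r) := by
    rw [PySem.List.pyRange_one, PySem.List.pyRange_one, List.map_map]
    norm_num
  rw [hshift, List.filter_map]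
  have hcongr : (PySem.List.pyRange 0 1000 1).filter (pvCondA ∘ fun r => 1000 * h + r)
      = (PySem.List.pyRange 0 1000 1).filter
          (fun r => (PySem.Int.mod h 2 == 0) && pvCond0 r) := by
    refine List.filter_congr (fun r hr => ?_)
    rw [PySem.List.mem_pyRange_one] at hr
    exact pvCondA_shift h r hr.1 hr.2
  rw [hcongr]
  by_cases he : PySem.Int.mod h 2 == 0
  · have hd : (2:Int) ∣ h := (PySem.Int.mod_eq_zero_iff_dvd h 2).mp (by simpa using he)
    have h2 : h % 2 = 0 := by omega
    simp [h2, pvFilter0]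
  · have hd : ¬ (2:Int) ∣ h := fun d => he (beq_iff_eq.mpr ((PySem.Int.mod_eq_zero_iff_dvd h 2).mpr d))
    simp [hd]

lemma pvFlat (A B : Int) :
    (PySem.List.pyRange A B 1).flatMap
      (fun h => PySem.List.pyRange (1000 * h) (1000 * h + 1000) 1)
    = PySem.List.pyRange (1000 * A) (1000 * B) 1 := by
  by_cases hAB : B ≤ A
  · rw [PySem.List.pyRange_one_eq_nil hAB, PySem.List.pyRange_one_eq_nil (by omega)]
    rfl
  · rw [not_le] at hAB
    obtain ⟨n, hn⟩ : ∃ n : ℕ, (B - A).toNat = n := ⟨_, rfl⟩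
    induction n generalizing A with
    | zero => omega
    | succ k ih =>
      rw [PySem.List.pyRange_one_cons hAB, List.flatMap_cons]
      by_cases hk : A + 1 < B
      · rw [ih (A + 1) hk (by omega),
          PySem.List.pyRange_one_append (1000 * A) (1000 * (A + 1)) (1000 * B)
            (by omega) (by omega)]
        ring_nf
      · have hB : B = A + 1 := by omega
        subst hB
        rw [PySem.List.pyRange_one_eq_nil (le_refl _), List.flatMap_nil]
        ring_nf
        simp

lemma pvClip (lo hi A B : Int) (hA : A ≤ lo) (hB : hi < B) :
    (PySem.List.pyRange A B 1).filter (fun n => decide (lo ≤ n) && decide (n ≤ hi))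
    = PySem.List.pyRange lo (hi + 1) 1 := by
  by_cases hlh : lo ≤ hi
  · rw [PySem.List.pyRange_one_append A lo B hA (by omega),
      PySem.List.pyRange_one_append lo (hi + 1) B (by omega) (by omega),
      List.filter_append, List.filter_append]
    have h1 : (PySem.List.pyRange A lo 1).filter
        (fun n => decide (lo ≤ n) && decide (n ≤ hi)) = [] := by
      rw [List.filter_eq_nil_iff]
      intro n hn
      rw [PySem.List.mem_pyRange_one] at hn
      simp only [Bool.and_eq_true, decide_eq_true_eq]
      omega
    have h2 : (PySem.List.pyRange lo (hi + 1) 1).filter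
        (fun n => decide (lo ≤ n) && decide (n ≤ hi))
        = PySem.List.pyRange lo (hi + 1) 1 := by
      rw [List.filter_eq_self]
      intro n hn
      rw [PySem.List.mem_pyRange_one] at hn
      simp only [Bool.and_eq_true, decide_eq_true_eq]
      omega
    have h3 : (PySem.List.pyRange (hi + 1) B 1).filter
        (fun n => decide (lo ≤ n) && decide (n ≤ hi)) = [] := by
      rw [List.filter_eq_nil_iff]
      intro n hn
      rw [PySem.List.mem_pyRange_one] at hn
      simp only [Bool.and_eq_true, decide_eq_true_eq]
      omega
    rw [h1, h2, h3, List.nil_append, List.append_nil]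
  · rw [PySem.List.pyRange_one_eq_nil (by omega : hi + 1 ≤ lo), List.filter_eq_nil_iff]
    intro n hn
    simp only [Bool.and_eq_true, decide_eq_true_eq]
    omega

-- B's output list equals A's output list
lemma pvLists (lo hi : Int) :
    (PySem.List.pyRange (PySem.Int.floordiv lo 1000) (PySem.Int.floordiv hi 1000 + 1) 1).foldl
      (fun acc h =>
        if PySem.Int.mod h 2 == 0 then
          pvCombos.foldl (fun acc2 r =>
            let n := 1000 * h + r
            if decide (lo ≤ n) && decide (n ≤ hi) then acc2 ++ [PySem.Int.toStr n] else acc2) acc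
        else acc) []
    = ((PySem.List.pyRange lo (hi + 1) 1).filter pvCondA).map PySem.Int.toStr := by
  have hinner : ∀ (h : Int) (acc : List String),
      pvCombos.foldl (fun acc2 r =>
        let n := 1000 * h + r
        if decide (lo ≤ n) && decide (n ≤ hi) then acc2 ++ [PySem.Int.toStr n] else acc2) acc
      = acc ++ ((pvCombos.filter
          (fun r => decide (lo ≤ 1000 * h + r) && decide (1000 * h + r ≤ hi))).map
          (fun r => PySem.Int.toStr (1000 * h + r))) := by
    intro h acc
    exact PySem.List.foldl_append_if _ _ _ _
  have houter : ∀ (L : List Int),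
      L.foldl (fun acc h =>
        if PySem.Int.mod h 2 == 0 then
          pvCombos.foldl (fun acc2 r =>
            let n := 1000 * h + r
            if decide (lo ≤ n) && decide (n ≤ hi) then acc2 ++ [PySem.Int.toStr n] else acc2) acc
        else acc) []
      = L.flatMap (fun h =>
          if PySem.Int.mod h 2 == 0 then
            ((pvCombos.filter
              (fun r => decide (lo ≤ 1000 * h + r) && decide (1000 * h + r ≤ hi))).map
              (fun r => PySem.Int.toStr (1000 * h + r)))
          else []) := by
    intro L
    have : (fun (acc : List String) (h : Int) =>
        if PySem.Int.mod h 2 == 0 then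
          pvCombos.foldl (fun acc2 r =>
            let n := 1000 * h + r
            if decide (lo ≤ n) && decide (n ≤ hi) then acc2 ++ [PySem.Int.toStr n] else acc2) acc
        else acc)
        = (fun (acc : List String) (h : Int) => acc ++
            (if PySem.Int.mod h 2 == 0 then
              ((pvCombos.filter
                (fun r => decide (lo ≤ 1000 * h + r) && decide (1000 * h + r ≤ hi))).map
                (fun r => PySem.Int.toStr (1000 * h + r)))
            else [])) := by
      funext acc h
      by_cases he : PySem.Int.mod h 2 == 0
      · simp only [he, if_true, hinner h acc]
      · have hd : ¬ (2:Int) ∣ h := fun d => he (beq_iff_eq.mpr ((PySem.Int.mod_eq_zero_iff_dvd h 2).mpr d))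
        simp [hd]
    rw [this, PySem.List.foldl_append_eq_flatMap, List.nil_append]
  rw [houter]
  -- rewrite each body into (blockFull h).filter pvCondA |>.filter inB |>.map toStr
  have hbody : ∀ h : Int,
      (if PySem.Int.mod h 2 == 0 then
        ((pvCombos.filter
          (fun r => decide (lo ≤ 1000 * h + r) && decide (1000 * h + r ≤ hi))).map
          (fun r => PySem.Int.toStr (1000 * h + r)))
      else [])
      = ((((PySem.List.pyRange (1000 * h) (1000 * h + 1000) 1).filter pvCondA).filter
          (fun n => decide (lo ≤ n) && decide (n ≤ hi))).map PySem.Int.toStr) := by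
    intro h
    rw [pvBlock h]
    by_cases he : PySem.Int.mod h 2 == 0
    · simp only [he, if_true]
      rw [List.filter_map, List.map_map]
      rfl
    · have hd : ¬ (2:Int) ∣ h := fun d => he (beq_iff_eq.mpr ((PySem.Int.mod_eq_zero_iff_dvd h 2).mpr d))
      simp [hd]
  simp only [hbody]
  rw [← List.map_flatMap, ← List.filter_flatMap, ← List.filter_flatMap, pvFlat]
  have hA : 1000 * PySem.Int.floordiv lo 1000 ≤ lo := by
    have := PySem.Int.floordiv_mul_add_mod lo 1000
    have := PySem.Int.mod_nonneg lo (by omega : (0:Int) < 1000)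
    omega
  have hB : hi < 1000 * (PySem.Int.floordiv hi 1000 + 1) := by
    have := PySem.Int.floordiv_mul_add_mod hi 1000
    have := PySem.Int.mod_lt hi (by omega : (0:Int) < 1000)
    omega
  rw [← List.filter_comm, pvClip lo hi _ _ hA hB]

-- ===== VERDICT (by name: the statement is the Claim_ definition above) =====
theorem dividing_spec : Claim_equal_dividing := by
  intro lo hi sym _
  show dividing lo hi sym = dividing_alt lo hi sym
  unfold dividing dividing_alt
  rw [PySem.List.foldl_append_if pvCondA PySem.Int.toStr, List.nil_append, pvLists lo hi]
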